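-- pv_equiv track=rewrite | github.com/tkgsn/priv_traj_gen | evaluation.py | get_stay_point
-- ===== SOURCE A (Python) =====
-- def get_stay_point(generated_route_trajs, generated_time_trajs, time_threshold):
--     stay_trajs = []
--     for route_traj, time_traj in zip(generated_route_trajs, generated_time_trajs):
--         stay_traj = []
--         stay_traj.append(route_traj[0])
--         for i in range(1,len(route_traj)-1):
--             if (time_traj[i] >= time_threshold) and (stay_traj[-1] != route_traj[i]):
--                 stay_traj.append(route_traj[i])
--         stay_traj.append(route_traj[-1])
--         stay_trajs.append(stay_traj)
--
--     return stay_trajs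
-- ===== SOURCE B (Python) =====
-- def _stay(route_traj, time_traj, time_threshold):
--     candidates = [route_traj[i] for i in range(1, len(route_traj) - 1)
--                   if time_traj[i] >= time_threshold]
--     stay = [route_traj[0]]
--     for x in candidates:
--         if stay[-1] != x:
--             stay.append(x)
--     stay.append(route_traj[-1])
--     return stay
--
--
-- def get_stay_point(generated_route_trajs, generated_time_trajs, time_threshold):
--     return [_stay(r, t, time_threshold)
--             for r, t in zip(generated_route_trajs, generated_time_trajs)]
-- ===== Notes on version B (the rewrite author's own statement) =====
-- stated objective: alternative
-- what changed: Replaces A's single interleaved filter-and-dedup loop (with an outer accumulator loop) by a per-trajectory helper that first filters the middle points by the time threshold, then folds them with consecutive-duplicate removal seeded by the first point, mapped over the zipped trajectories by a comprehension.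
import Mathlib
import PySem

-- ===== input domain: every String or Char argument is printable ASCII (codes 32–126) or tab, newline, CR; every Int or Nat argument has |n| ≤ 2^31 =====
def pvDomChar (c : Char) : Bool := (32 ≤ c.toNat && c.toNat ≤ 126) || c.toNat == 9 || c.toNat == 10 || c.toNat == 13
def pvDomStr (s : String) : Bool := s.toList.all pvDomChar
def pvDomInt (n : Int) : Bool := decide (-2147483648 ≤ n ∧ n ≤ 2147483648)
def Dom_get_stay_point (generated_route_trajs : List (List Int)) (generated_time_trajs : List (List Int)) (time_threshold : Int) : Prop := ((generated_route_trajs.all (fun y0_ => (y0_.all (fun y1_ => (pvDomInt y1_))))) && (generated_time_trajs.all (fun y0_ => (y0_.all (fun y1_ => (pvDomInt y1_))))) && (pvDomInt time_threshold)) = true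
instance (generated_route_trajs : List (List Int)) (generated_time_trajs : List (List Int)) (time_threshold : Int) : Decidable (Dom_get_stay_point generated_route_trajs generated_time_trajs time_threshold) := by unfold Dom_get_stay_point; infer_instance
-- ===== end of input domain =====

-- B replaces A's interleaved filter-and-dedup loop by a filter pass followed by a
-- seeded consecutive-dedup fold, mapped over the zipped trajectories (alternative
-- decomposition, same cost).

-- ===== PORT A =====
def get_stay_point (generated_route_trajs : List (List Int)) (generated_time_trajs : List (List Int)) (time_threshold : Int) : List (List Int) :=
  (List.zip generated_route_trajs generated_time_trajs).foldl
    (fun stay_trajs p =>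
      let r := p.1
      let t := p.2
      -- stay_traj = [route_traj[0]]
      let stay0 : List Int := [(PySem.List.pyGet? r 0).getD 0]
      -- for i in range(1, len(route_traj)-1): if time ∧ dedup: append
      let stay := (PySem.List.pyRange 1 ((r.length : Int) - 1) 1).foldl
        (fun s i =>
          if (PySem.List.pyGet? t i).getD 0 ≥ time_threshold ∧
             (PySem.List.pyGet? s (-1)).getD 0 ≠ (PySem.List.pyGet? r i).getD 0
          then s ++ [(PySem.List.pyGet? r i).getD 0] else s) stay0
      stay_trajs ++ [stay ++ [(PySem.List.pyGet? r (-1)).getD 0]]) []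

-- ===== PORT B =====
def pvStayAlt (r : List Int) (t : List Int) (time_threshold : Int) : List Int :=
  -- candidates = [r[i] for i in range(1, len(r)-1) if t[i] >= time_threshold]
  let candidates :=
    ((PySem.List.pyRange 1 ((r.length : Int) - 1) 1).filter
        (fun i => decide ((PySem.List.pyGet? t i).getD 0 ≥ time_threshold))).map
      (fun i => (PySem.List.pyGet? r i).getD 0)
  -- seeded consecutive dedup
  let stay := candidates.foldl
    (fun s x => if (PySem.List.pyGet? s (-1)).getD 0 ≠ x then s ++ [x] else s)
    [(PySem.List.pyGet? r 0).getD 0]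
  stay ++ [(PySem.List.pyGet? r (-1)).getD 0]

def get_stay_point_alt (generated_route_trajs : List (List Int)) (generated_time_trajs : List (List Int)) (time_threshold : Int) : List (List Int) :=
  (List.zip generated_route_trajs generated_time_trajs).map
    (fun p => pvStayAlt p.1 p.2 time_threshold)

-- ===== PRECONDITION & SPEC =====
-- Pre_ excludes exactly the inputs where Python A raises IndexError: a zipped pair
-- whose route trajectory is empty, or (when it has ≥ 3 points) whose time
-- trajectory is too short for the middle indices.
def Pre_get_stay_point (generated_route_trajs : List (List Int)) (generated_time_trajs : List (List Int)) (time_threshold : Int) : Prop :=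
  ∀ p ∈ List.zip generated_route_trajs generated_time_trajs,
    p.1 ≠ [] ∧ (3 ≤ p.1.length → p.1.length ≤ p.2.length + 1)
instance (generated_route_trajs : List (List Int)) (generated_time_trajs : List (List Int)) (time_threshold : Int) : Decidable (Pre_get_stay_point generated_route_trajs generated_time_trajs time_threshold) := by unfold Pre_get_stay_point; infer_instance

def pvWitness_get_stay_point : List (List Int) × List (List Int) × Int :=
  ([[1, 2, 2, 3]], [[0, 5, 5, 0]], 3)

def Spec_get_stay_point (generated_route_trajs : List (List Int)) (generated_time_trajs : List (List Int)) (time_threshold : Int) (out : List (List Int)) : Prop := out = get_stay_point_alt generated_route_trajs generated_time_trajs time_threshold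
instance (generated_route_trajs : List (List Int)) (generated_time_trajs : List (List Int)) (time_threshold : Int) (out : List (List Int)) : Decidable (Spec_get_stay_point generated_route_trajs generated_time_trajs time_threshold out) := by unfold Spec_get_stay_point; infer_instance

-- ===== CLAIM (what is proved, stated in full; the proofs are below) =====
def Claim_equal_get_stay_point : Prop := ∀ (generated_route_trajs : List (List Int)) (generated_time_trajs : List (List Int)) (time_threshold : Int), Dom_get_stay_point generated_route_trajs generated_time_trajs time_threshold → Pre_get_stay_point generated_route_trajs generated_time_trajs time_threshold → Spec_get_stay_point generated_route_trajs generated_time_trajs time_threshold (get_stay_point generated_route_trajs generated_time_trajs time_threshold)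

-- ===== LEMMAS AND PROOFS =====

-- folding with an if-guard equals folding the filtered list
theorem pv_foldl_filter {α β : Type} (P : α → Bool) (g : β → α → β) :
    ∀ (l : List α) (init : β),
      l.foldl (fun s i => if P i then g s i else s) init = (l.filter P).foldl g init := by
  intro l
  induction l with
  | nil => intro init; rfl
  | cons a l ih =>
    intro init
    by_cases h : P a = true
    · simp [List.filter_cons, h, ih]
    · simp [List.filter_cons, h, ih]

-- accumulate-append over a list is map
theorem pv_foldl_append_map {α β : Type} (f : α → β) :
    ∀ (l : List α) (init : List β),
      l.foldl (fun a x => a ++ [f x]) init = init ++ l.map f := by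
  intro l
  induction l with
  | nil => intro init; simp
  | cons a l ih => intro init; simp [ih]

-- splitting a conjunctive guard
theorem pv_if_and {β : Type} (p q : Prop) [Decidable p] [Decidable q] (a b : β) :
    (if p ∧ q then a else b) = if p then (if q then a else b) else b := by
  by_cases hp : p <;> by_cases hq : q <;> simp [hp, hq]

theorem pv_stay_eq (r t : List Int) (th : Int) :
    ((PySem.List.pyRange 1 ((r.length : Int) - 1) 1).foldl
        (fun s i =>
          if (PySem.List.pyGet? t i).getD 0 ≥ th ∧
             (PySem.List.pyGet? s (-1)).getD 0 ≠ (PySem.List.pyGet? r i).getD 0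
          then s ++ [(PySem.List.pyGet? r i).getD 0] else s)
        [(PySem.List.pyGet? r 0).getD 0]) ++ [(PySem.List.pyGet? r (-1)).getD 0]
    = pvStayAlt r t th := by
  simp only [pvStayAlt, List.foldl_map]
  rw [← pv_foldl_filter (fun i => decide ((PySem.List.pyGet? t i).getD 0 ≥ th))
      (fun s i => if (PySem.List.pyGet? s (-1)).getD 0 ≠ (PySem.List.pyGet? r i).getD 0
                  then s ++ [(PySem.List.pyGet? r i).getD 0] else s)]
  congr 2
  funext s i
  rw [pv_if_and]
  simp

-- ===== VERDICT (by name: the statement is the Claim_ definition above) =====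
theorem get_stay_point_spec : Claim_equal_get_stay_point := by
  intro rs ts th _ _
  unfold Spec_get_stay_point get_stay_point get_stay_point_alt
  have hstep :
      (fun (stay_trajs : List (List Int)) (p : List Int × List Int) =>
        let r := p.1
        let t := p.2
        let stay0 : List Int := [(PySem.List.pyGet? r 0).getD 0]
        let stay := (PySem.List.pyRange 1 ((r.length : Int) - 1) 1).foldl
          (fun s i =>
            if (PySem.List.pyGet? t i).getD 0 ≥ th ∧
               (PySem.List.pyGet? s (-1)).getD 0 ≠ (PySem.List.pyGet? r i).getD 0
            then s ++ [(PySem.List.pyGet? r i).getD 0] else s) stay0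
        stay_trajs ++ [stay ++ [(PySem.List.pyGet? r (-1)).getD 0]])
      = fun stay_trajs p => stay_trajs ++ [pvStayAlt p.1 p.2 th] := by
    funext acc p
    simp only []
    rw [pv_stay_eq]
  rw [hstep, pv_foldl_append_map (fun p : List Int × List Int => pvStayAlt p.1 p.2 th)]
  simp
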